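-- pv_equiv track=rewrite | github.com/Sn3cor/Data-Structures-and-Algorithms | Dynamic/BitonicTSP.py | BitonicTSP_iter
-- ===== SOURCE A (Python) =====
-- def BitonicTSP_iter(A,D):
--     n = len(A)
--     F = [[0] * n for i in range(n)]
--     F[0][1] = D[0][1]
--
--     for j in range(2,n):
--
--         # W tej pętli cały czas jest spełniony warunek i<j-1
--         # dlatego realizujemy działanie z podpunktu a)
--         for i in range(j-1):
--             F[i][j] = F[i][j-1] + D[j-1][j]
--
--         # Po wyjściu z pętli i=j-1
--         # dlatego rozpoczynamy działanie z podpunktu b)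
--         F[j-1][j] = F[0][j-1] + D[0][j] # incjalizacja dla k=0
--
--         for k in range(1,j-1):
--             # Optymalizujemy ściezkę, szukając takiej kombinacji z dostępnych miast,
--             # aby znaleźć takie ściezki zeby suma ich długości była minimalna
--             F[j-1][j] = min(F[j-1][j], F[k][j-1] + D[k][j])
--
--     F[n-1][n-1] = F[n-2][n-1] + D[n-2][n-1] # Dodajemy ostatni krok do zamknięcia ścieki
--
--     return F[n-1][n-1] # Zwracamy wynik
-- ===== SOURCE B (Python) =====
-- def BitonicTSP_iter(A, D):
--     # Telescoping the DP: F[i][j] = F[i][i+1] + sum(D[t][t+1] for t in i+1..j-1),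
--     # so the whole table collapses to g(j) = F[j-1][j] plus a running prefix sum P.
--     # We store h[k] = g(k+1) - P[k+1], giving F[k][j-1] = h[k] + P[j-1].
--     n = len(A)
--     P = 0                 # P[j] = sum of D[t][t+1] for t = 1..j-1; here P[1] = 0
--     h = [D[0][1]]         # h[0] = g(1) - P[1] = D[0][1]
--     for j in range(2, n):
--         gj = min(h[k] + P + D[k][j] for k in range(j - 1))
--         P += D[j - 1][j]
--         h.append(gj - P)
--     return h[n - 2] + P + D[n - 2][n - 1]
-- ===== Notes on version B (the rewrite author's own statement) =====
-- stated objective: faster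
-- what changed: Collapses the n-by-n DP table via the telescoping identity F[i][j] = F[i][i+1] + prefix-sum of adjacent edges: B keeps only a running prefix accumulator P and a list h[k] = g(k+1) - P[k+1], so the per-j pass that rewrites a whole table column disappears and each step does one min over k plus one append.
import Mathlib
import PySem

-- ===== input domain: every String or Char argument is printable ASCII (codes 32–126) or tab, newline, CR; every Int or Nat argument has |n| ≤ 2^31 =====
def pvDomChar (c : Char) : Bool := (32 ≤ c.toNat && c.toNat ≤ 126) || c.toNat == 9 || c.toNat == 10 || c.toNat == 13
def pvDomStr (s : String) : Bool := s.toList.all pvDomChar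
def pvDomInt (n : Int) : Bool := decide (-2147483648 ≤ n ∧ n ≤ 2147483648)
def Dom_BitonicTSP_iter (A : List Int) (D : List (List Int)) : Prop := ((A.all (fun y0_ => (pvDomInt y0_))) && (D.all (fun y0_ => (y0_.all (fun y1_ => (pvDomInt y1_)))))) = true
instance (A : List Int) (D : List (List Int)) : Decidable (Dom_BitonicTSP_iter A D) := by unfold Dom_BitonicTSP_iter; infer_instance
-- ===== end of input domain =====

-- B collapses A's n×n DP table via the telescoping identity F[i][j] = F[i][i+1] + prefix
-- sum of adjacent edges, keeping only a scalar accumulator and one list (O(n) space).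


-- ===== PORT A =====
-- matrix read M[i][j]; every read is in range under Pre_, so the default 0 never surfaces there
def mx (M : List (List Int)) (i j : Nat) : Int := (M.getD i []).getD j 0
-- matrix write M[i][j] = v; in range under Pre_
def mset (M : List (List Int)) (i j : Nat) (v : Int) : List (List Int) :=
  M.set i ((M.getD i []).set j v)

-- body of A's outer `for j in range(2, n)` loop (the two inner loops plus the k=0 init)
def stepA (D : List (List Int)) (F : List (List Int)) (j : Nat) : List (List Int) :=
  let F := (List.range (j-1)).foldl (fun F i => mset F i j (mx F i (j-1) + mx D (j-1) j)) F
  let F := mset F (j-1) j (mx F 0 (j-1) + mx D 0 j)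
  (List.range' 1 (j-2)).foldl
    (fun F k => mset F (j-1) j (min (mx F (j-1) j) (mx F k (j-1) + mx D k j))) F

def BitonicTSP_iter (A : List Int) (D : List (List Int)) : Int :=
  let n := A.length
  let F := List.replicate n (List.replicate n (0:Int))
  let F := mset F 0 1 (mx D 0 1)
  let F := (List.range' 2 (n-2)).foldl (stepA D) F
  let F := mset F (n-1) (n-1) (mx F (n-2) (n-1) + mx D (n-2) (n-1))
  mx F (n-1) (n-1)

-- ===== PORT B =====
-- body of B's loop: state is (P, h); `min(... for k in range(j-1))` is ported as
-- PySem.List.min? of the mapped list (h[k] is always in range, so getD's default never surfaces)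
def stepB (D : List (List Int)) (st : Int × List Int) (j : Nat) : Int × List Int :=
  let gj := (PySem.List.min?
      ((List.range (j-1)).map (fun k => st.2.getD k 0 + st.1 + mx D k j)) (fun y => y)).getD 0
  let P := st.1 + mx D (j-1) j
  (P, st.2 ++ [gj - P])

def BitonicTSP_iter_alt (A : List Int) (D : List (List Int)) : Int :=
  let n := A.length
  let st := (List.range' 2 (n-2)).foldl (stepB D) (0, [mx D 0 1])
  -- the final reads use Python's (possibly negative) indexing, exact via pyGetD
  PySem.List.pyGetD st.2 ((n:Int)-2) 0 + st.1
    + PySem.List.pyGetD (PySem.List.pyGetD D ((n:Int)-2) []) ((n:Int)-1) 0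

-- ===== PRECONDITION & SPEC =====
-- Exactly where the Python A returns without an exception: n ≥ 2 and D has every row/column
-- the sweep indexes (rows 0..n-2, each of length ≥ n; row n-1 of D is never read).
def Pre_BitonicTSP_iter (A : List Int) (D : List (List Int)) : Prop :=
  2 ≤ A.length ∧ A.length - 1 ≤ D.length ∧
    ∀ row ∈ D.take (A.length - 1), A.length ≤ row.length
instance (A : List Int) (D : List (List Int)) : Decidable (Pre_BitonicTSP_iter A D) := by
  unfold Pre_BitonicTSP_iter; infer_instance

def pvWitness_BitonicTSP_iter : List Int × List (List Int) :=
  ([0, 0, 0], [[0, 1, 2], [1, 0, 3], [2, 3, 0]])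

def Spec_BitonicTSP_iter (A : List Int) (D : List (List Int)) (out : Int) : Prop := out = BitonicTSP_iter_alt A D
instance (A : List Int) (D : List (List Int)) (out : Int) : Decidable (Spec_BitonicTSP_iter A D out) := by unfold Spec_BitonicTSP_iter; infer_instance

-- ===== CLAIM (what is proved, stated in full; the proofs are below) =====
def Claim_equal_BitonicTSP_iter : Prop := ∀ (A : List Int) (D : List (List Int)), Dom_BitonicTSP_iter A D → Pre_BitonicTSP_iter A D → Spec_BitonicTSP_iter A D (BitonicTSP_iter A D)

-- ===== LEMMAS AND PROOFS =====

theorem getD_set_eq {a : Type} (l : List a) {i : Nat} (x d : a) (h : i < l.length) :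
    (l.set i x).getD i d = x := by
  simp [List.getD_eq_getElem?_getD, h]

theorem getD_set_ne {a : Type} (l : List a) {i i' : Nat} (x d : a) (h : i ≠ i') :
    (l.set i x).getD i' d = l.getD i' d := by
  rw [List.getD_eq_getElem?_getD, List.getElem?_set_ne h, ← List.getD_eq_getElem?_getD]

-- F is an n×n matrix
def Shape (n : Nat) (F : List (List Int)) : Prop :=
  F.length = n ∧ ∀ r ∈ F, r.length = n

theorem row_len {n : Nat} {F : List (List Int)} (h : Shape n F) {i : Nat} (hi : i < n) :
    (F.getD i []).length = n := by
  obtain ⟨h1, h2⟩ := h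
  have hi' : i < F.length := by omega
  rw [List.getD_eq_getElem?_getD, List.getElem?_eq_getElem hi']
  exact h2 _ (List.getElem_mem hi')

theorem shape_mset {n : Nat} {F : List (List Int)} (h : Shape n F) (i j : Nat) (v : Int) :
    Shape n (mset F i j v) := by
  by_cases hi : i < F.length
  · obtain ⟨h1, h2⟩ := h
    refine ⟨by simpa [mset] using h1, ?_⟩
    intro r hr
    rcases List.mem_or_eq_of_mem_set hr with hr | hr
    · exact h2 _ hr
    · subst hr
      rw [List.length_set]
      exact row_len ⟨h1, h2⟩ (by omega)
  · rw [mset, List.set_eq_of_length_le (by omega)]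
    exact h

theorem mx_mset_self {n : Nat} {F : List (List Int)} (h : Shape n F) {i j : Nat}
    (hi : i < n) (hj : j < n) (v : Int) : mx (mset F i j v) i j = v := by
  have h1 : F.length = n := h.1
  have hi' : i < F.length := by omega
  have hrow : (F.getD i []).length = n := row_len h hi
  rw [mx, mset, getD_set_eq _ _ _ hi', getD_set_eq _ _ _ (by omega)]

theorem mx_mset_ne {F : List (List Int)} {i j : Nat} (v : Int) {i' j' : Nat}
    (h : i ≠ i' ∨ j ≠ j') : mx (mset F i j v) i' j' = mx F i' j' := by
  by_cases hii : i = i'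
  · subst hii
    have hjj : j ≠ j' := h.resolve_left (by simp)
    by_cases hi : i < F.length
    · rw [mx, mx, mset, getD_set_eq _ _ _ hi, getD_set_ne _ _ _ hjj]
    · rw [mset, List.set_eq_of_length_le (by omega)]
  · rw [mx, mx, mset, getD_set_ne _ _ _ hii]

theorem range'_concat' (s t : Nat) : List.range' s (t+1) = List.range' s t ++ [s+t] := by
  simp [List.range'_concat]

-- A's first inner loop: writes rows 0..r-1 of column j, reading only column j-1
theorem loopA1_spec (D : List (List Int)) {n j : Nat} (hj : j < n) (hj1 : 1 ≤ j) :
    ∀ (r : Nat) (F : List (List Int)), Shape n F → r < j →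
    Shape n ((List.range r).foldl (fun F i => mset F i j (mx F i (j-1) + mx D (j-1) j)) F) ∧
    (∀ i' j', j' ≠ j →
      mx ((List.range r).foldl (fun F i => mset F i j (mx F i (j-1) + mx D (j-1) j)) F) i' j'
        = mx F i' j') ∧
    (∀ i', r ≤ i' →
      mx ((List.range r).foldl (fun F i => mset F i j (mx F i (j-1) + mx D (j-1) j)) F) i' j
        = mx F i' j) ∧
    (∀ i', i' < r →
      mx ((List.range r).foldl (fun F i => mset F i j (mx F i (j-1) + mx D (j-1) j)) F) i' j
        = mx F i' (j-1) + mx D (j-1) j) := by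
  intro r
  induction r with
  | zero =>
    intro F hF _
    simp only [List.range_zero, List.foldl_nil]
    refine And.intro hF (And.intro ?_ (And.intro ?_ ?_)) <;> simp
  | succ r ih =>
    intro F hF hr
    rw [List.range_succ, List.foldl_append, List.foldl_cons, List.foldl_nil]
    obtain ⟨ihS, ihC, ihGe, ihLt⟩ := ih F hF (by omega)
    set G := (List.range r).foldl (fun F i => mset F i j (mx F i (j-1) + mx D (j-1) j)) F with hG
    refine ⟨shape_mset ihS _ _ _, ?_, ?_, ?_⟩
    · intro i' j' hj'
      rw [mx_mset_ne _ (Or.inr (fun hh => hj' hh.symm))]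
      exact ihC i' j' hj'
    · intro i' hi'
      rw [mx_mset_ne _ (Or.inl (by omega))]
      exact ihGe i' (by omega)
    · intro i' hi'
      by_cases hir : i' = r
      · subst hir
        rw [mx_mset_self ihS (by omega) hj]
        rw [ihC i' (j-1) (by omega)]
      · rw [mx_mset_ne _ (Or.inl (fun hh => hir hh.symm))]
        exact ihLt i' (by omega)

-- A's second inner loop: accumulates a running min into cell (j-1, j)
theorem loopA2_spec (D : List (List Int)) {n j : Nat} (hj : j < n) (hj1 : 1 ≤ j) :
    ∀ (t : Nat) (F : List (List Int)), Shape n F → t < j - 1 →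
    Shape n ((List.range' 1 t).foldl
        (fun F k => mset F (j-1) j (min (mx F (j-1) j) (mx F k (j-1) + mx D k j))) F) ∧
    (∀ i' j', i' ≠ j-1 ∨ j' ≠ j →
      mx ((List.range' 1 t).foldl
        (fun F k => mset F (j-1) j (min (mx F (j-1) j) (mx F k (j-1) + mx D k j))) F) i' j'
        = mx F i' j') ∧
    mx ((List.range' 1 t).foldl
        (fun F k => mset F (j-1) j (min (mx F (j-1) j) (mx F k (j-1) + mx D k j))) F) (j-1) j
      = (List.range' 1 t).foldl (fun acc k => min acc (mx F k (j-1) + mx D k j)) (mx F (j-1) j) := by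
  intro t
  induction t with
  | zero =>
    intro F hF _
    simp only [List.range'_zero, List.foldl_nil]
    refine And.intro hF (And.intro ?_ ?_) <;> simp
  | succ t ih =>
    intro F hF ht
    rw [range'_concat' 1 t, List.foldl_append, List.foldl_append, List.foldl_cons,
      List.foldl_nil, List.foldl_cons, List.foldl_nil]
    obtain ⟨ihS, ihC, ihV⟩ := ih F hF (by omega)
    set G := (List.range' 1 t).foldl
      (fun F k => mset F (j-1) j (min (mx F (j-1) j) (mx F k (j-1) + mx D k j))) F with hG
    refine ⟨shape_mset ihS _ _ _, ?_, ?_⟩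
    · intro i' j' h
      rcases h with h | h
      · rw [mx_mset_ne _ (Or.inl (fun hh => h hh.symm))]
        exact ihC i' j' (Or.inl h)
      · rw [mx_mset_ne _ (Or.inr (fun hh => h hh.symm))]
        exact ihC i' j' (Or.inr h)
    · rw [mx_mset_self ihS (by omega) hj, ihV, ihC (1+t) (j-1) (Or.inr (by omega))]

-- getD on an append whose left part is long enough
theorem getD_append_left {l r : List Int} {i : Nat} (hi : i < l.length) :
    (l ++ r).getD i 0 = l.getD i 0 := by
  rw [List.getD_eq_getElem?_getD, List.getElem?_append_left hi, ← List.getD_eq_getElem?_getD]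

-- one outer iteration preserves the table ↔ (P, h) correspondence
theorem step_corr (D : List (List Int)) {n m : Nat} (hjn : m + 2 < n)
    {F : List (List Int)} {st : Int × List Int} (hF : Shape n F) (hlen : st.2.length = m + 1)
    (hcorr : ∀ i, i < m + 1 → mx F i (m+1) = st.2.getD i 0 + st.1) :
    Shape n (stepA D F (m+2)) ∧ (stepB D st (m+2)).2.length = m + 2 ∧
    ∀ i, i < m + 2 → mx (stepA D F (m+2)) i (m+2)
        = (stepB D st (m+2)).2.getD i 0 + (stepB D st (m+2)).1 := by
  have hm1 : m + 2 - 1 = m + 1 := by omega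
  have hm2 : m + 2 - 2 = m := by omega
  obtain ⟨S1, C1, U1, L1⟩ := loopA1_spec D hjn (by omega) (m+1) F hF (by omega)
  rw [hm1] at S1 C1 U1 L1
  set F1 := (List.range (m+1)).foldl
    (fun F i => mset F i (m+2) (mx F i (m+1) + mx D (m+1) (m+2))) F with hF1
  set v0 : Int := mx F1 0 (m+1) + mx D 0 (m+2) with hv0def
  have S2 : Shape n (mset F1 (m+1) (m+2) v0) := shape_mset S1 _ _ _
  obtain ⟨S3, C3, V3⟩ := loopA2_spec D hjn (by omega) m (mset F1 (m+1) (m+2) v0) S2 (by omega)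
  rw [hm1] at S3 C3 V3
  have hstepA : stepA D F (m+2) = (List.range' 1 m).foldl
      (fun F k => mset F (m+1) (m+2)
        (min (mx F (m+1) (m+2)) (mx F k (m+1) + mx D k (m+2))))
      (mset F1 (m+1) (m+2) v0) := by
    simp only [stepA, hm1, hm2, hF1, hv0def]
  set gj : Int := (PySem.List.min?
      ((List.range (m+1)).map (fun k => st.2.getD k 0 + st.1 + mx D k (m+2)))
      (fun y => y)).getD 0 with hgj
  have hstepB : stepB D st (m+2) = (st.1 + mx D (m+1) (m+2),
      st.2 ++ [gj - (st.1 + mx D (m+1) (m+2))]) := by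
    simp only [stepB, hm1, hgj]
  refine ⟨by rw [hstepA]; exact S3, by simp [hstepB, hlen], ?_⟩
  intro i hi
  by_cases hilt : i < m + 1
  · -- below the diagonal cell: telescoping step, h unchanged, P grows by D[m+1][m+2]
    rw [hstepA, C3 i (m+2) (Or.inl (by omega)),
      mx_mset_ne _ (Or.inl (by omega)), L1 i hilt, hcorr i (by omega), hstepB]
    rw [getD_append_left (by omega)]
    ring
  · -- the diagonal cell (i = m+1): A's running min vs B's min() over the generator
    have hi' : i = m + 1 := by omega
    subst hi'
    rw [hstepA, V3, mx_mset_self S1 (by omega) hjn]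
    have hreads : ∀ (acc : Int), ∀ k ∈ List.range' 1 m,
        min acc (mx (mset F1 (m+1) (m+2) v0) k (m+1) + mx D k (m+2))
          = min acc (st.2.getD k 0 + st.1 + mx D k (m+2)) := by
      intro acc k hk
      have hk' : 1 ≤ k ∧ k < 1 + m := by simpa [List.mem_range'_1] using hk
      rw [mx_mset_ne _ (Or.inl (by omega)), C1 k (m+1) (by omega), hcorr k (by omega)]
    rw [List.foldl_ext _ _ _ hreads, hstepB]
    rw [List.getD_eq_getElem?_getD, List.getElem?_append_right (by omega), hlen]
    simp only [Nat.sub_self, List.getElem?_cons_zero, Option.getD_some]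
    have hexp : gj = (List.range' 1 m).foldl
        (fun acc k => min acc (st.2.getD k 0 + st.1 + mx D k (m+2))) v0 := by
      rw [hgj, show List.range (m+1) = 0 :: List.range' 1 m from by
        rw [List.range_eq_range', List.range'_succ]]
      rw [List.map_cons, PySem.List.min?_id_cons]
      simp only [Option.getD_some]
      rw [List.foldl_map]
      congr 1
      rw [hv0def, C1 0 (m+1) (by omega), hcorr 0 (by omega)]
    rw [hexp]
    ring

-- the whole outer loop keeps A's column m+1 equal to B's h-list shifted by P
theorem loop_corr (D : List (List Int)) {n : Nat} (hn : 2 ≤ n) :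
    ∀ m, m + 2 ≤ n →
    Shape n ((List.range' 2 m).foldl (stepA D)
      (mset (List.replicate n (List.replicate n (0:Int))) 0 1 (mx D 0 1))) ∧
    ((List.range' 2 m).foldl (stepB D) (0, [mx D 0 1])).2.length = m + 1 ∧
    ∀ i, i < m + 1 →
      mx ((List.range' 2 m).foldl (stepA D)
        (mset (List.replicate n (List.replicate n (0:Int))) 0 1 (mx D 0 1))) i (m+1)
      = ((List.range' 2 m).foldl (stepB D) (0, [mx D 0 1])).2.getD i 0
        + ((List.range' 2 m).foldl (stepB D) (0, [mx D 0 1])).1 := by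
  intro m
  induction m with
  | zero =>
    intro _
    have hS0 : Shape n (List.replicate n (List.replicate n (0:Int))) := by
      constructor
      · simp
      · intro r hr; rw [List.eq_of_mem_replicate hr]; simp
    refine ⟨shape_mset hS0 _ _ _, by simp, ?_⟩
    intro i hi
    have hi0 : i = 0 := by omega
    subst hi0
    simp only [List.range'_zero, List.foldl_nil]
    rw [mx_mset_self hS0 (by omega) (by omega)]
    simp
  | succ m ih =>
    intro hm
    obtain ⟨ihS, ihL, ihV⟩ := ih (by omega)
    rw [range'_concat' 2 m, List.foldl_append, List.foldl_append, List.foldl_cons,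
      List.foldl_nil, List.foldl_cons, List.foldl_nil,
      show (2:Nat) + m = m + 2 from by omega, show m + 1 + 1 = m + 2 from by omega]
    exact step_corr D (by omega) ihS ihL ihV

-- ===== VERDICT (by name: the statement is the Claim_ definition above) =====
theorem BitonicTSP_iter_spec : Claim_equal_BitonicTSP_iter := by
  intro A D _ hpre
  obtain ⟨hn, _, _⟩ := hpre
  unfold Spec_BitonicTSP_iter BitonicTSP_iter BitonicTSP_iter_alt
  obtain ⟨m, hm⟩ : ∃ m, A.length = m + 2 := ⟨A.length - 2, by omega⟩
  rw [hm]
  simp only [show m+2-2 = m from by omega, show m+2-1 = m+1 from by omega]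
  rw [show ((m+2 : Nat) : Int) - 2 = ((m : Nat) : Int) from by push_cast; ring,
    show ((m+2 : Nat) : Int) - 1 = ((m+1 : Nat) : Int) from by push_cast; ring,
    PySem.List.pyGetD_natCast, PySem.List.pyGetD_natCast, PySem.List.pyGetD_natCast]
  obtain ⟨hS, hL, hV⟩ := loop_corr D (n := m+2) (by omega) m (by omega)
  rw [mx_mset_self hS (by omega) (by omega)]
  rw [hV m (by omega)]
  simp [mx]
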